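-- pv_equiv track=rewrite | github.com/AdityaLanka04/L1 | backend/concept_classification_agent.py | _infer_subcategory
-- ===== SOURCE A (Python) =====
-- def _infer_subcategory(concept_name: str, category: str) -> str:
--     """Infer subcategory from concept name"""
--     name_lower = concept_name.lower()
--
--     if category == "Computer Science":
--         if any(word in name_lower for word in ["sort", "merge", "quick", "heap", "bubble"]):
--             return "Sorting Algorithms"
--         elif any(word in name_lower for word in ["search", "bfs", "dfs", "dijkstra", "graph"]):
--             return "Graph Algorithms"
--         elif any(word in name_lower for word in ["tree", "binary", "avl", "red-black"]):
--             return "Data Structures"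
--         elif any(word in name_lower for word in ["neural", "learning", "ai", "ml"]):
--             return "Machine Learning"
--         return "Algorithms"
--
--     elif category == "Mathematics":
--         if any(word in name_lower for word in ["derivative", "integral", "limit"]):
--             return "Calculus"
--         elif any(word in name_lower for word in ["matrix", "vector", "eigen"]):
--             return "Linear Algebra"
--         elif any(word in name_lower for word in ["graph", "combinatorics", "discrete"]):
--             return "Discrete Math"
--         return "General Mathematics"
--
--     return category
-- ===== SOURCE B (Python) =====
-- _DEFAULTS = {"Computer Science": "Algorithms", "Mathematics": "General Mathematics"}
--
-- # One flat priority table: (category, keyword, rank, subcategory); lower rank wins.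
-- _KEYWORDS = [
--     ("Computer Science", "sort", 0, "Sorting Algorithms"),
--     ("Computer Science", "merge", 0, "Sorting Algorithms"),
--     ("Computer Science", "quick", 0, "Sorting Algorithms"),
--     ("Computer Science", "heap", 0, "Sorting Algorithms"),
--     ("Computer Science", "bubble", 0, "Sorting Algorithms"),
--     ("Computer Science", "search", 1, "Graph Algorithms"),
--     ("Computer Science", "bfs", 1, "Graph Algorithms"),
--     ("Computer Science", "dfs", 1, "Graph Algorithms"),
--     ("Computer Science", "dijkstra", 1, "Graph Algorithms"),
--     ("Computer Science", "graph", 1, "Graph Algorithms"),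
--     ("Computer Science", "tree", 2, "Data Structures"),
--     ("Computer Science", "binary", 2, "Data Structures"),
--     ("Computer Science", "avl", 2, "Data Structures"),
--     ("Computer Science", "red-black", 2, "Data Structures"),
--     ("Computer Science", "neural", 3, "Machine Learning"),
--     ("Computer Science", "learning", 3, "Machine Learning"),
--     ("Computer Science", "ai", 3, "Machine Learning"),
--     ("Computer Science", "ml", 3, "Machine Learning"),
--     ("Mathematics", "derivative", 4, "Calculus"),
--     ("Mathematics", "integral", 4, "Calculus"),
--     ("Mathematics", "limit", 4, "Calculus"),
--     ("Mathematics", "matrix", 5, "Linear Algebra"),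
--     ("Mathematics", "vector", 5, "Linear Algebra"),
--     ("Mathematics", "eigen", 5, "Linear Algebra"),
--     ("Mathematics", "graph", 6, "Discrete Math"),
--     ("Mathematics", "combinatorics", 6, "Discrete Math"),
--     ("Mathematics", "discrete", 6, "Discrete Math"),
-- ]
--
--
-- def _infer_subcategory(concept_name: str, category: str) -> str:
--     """Infer subcategory: full scan of a flat keyword table, keeping the best (lowest-rank) hit."""
--     if category not in _DEFAULTS:
--         return category
--     name_lower = concept_name.lower()
--     best = None
--     for cat, kw, rank, sub in _KEYWORDS:
--         if cat == category and kw in name_lower and (best is None or rank < best[0]):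
--             best = (rank, sub)
--     return best[1] if best is not None else _DEFAULTS[category]
-- ===== Notes on version B (the rewrite author's own statement) =====
-- stated objective: alternative
-- what changed: Replaced the per-category nested if/elif chains of short-circuiting any() scans by a single full pass over one flat (category, keyword, rank, subcategory) priority table, keeping the lowest-rank matching row in an accumulator and falling back to a per-category default dict (passthrough for unknown categories).
import Mathlib
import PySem

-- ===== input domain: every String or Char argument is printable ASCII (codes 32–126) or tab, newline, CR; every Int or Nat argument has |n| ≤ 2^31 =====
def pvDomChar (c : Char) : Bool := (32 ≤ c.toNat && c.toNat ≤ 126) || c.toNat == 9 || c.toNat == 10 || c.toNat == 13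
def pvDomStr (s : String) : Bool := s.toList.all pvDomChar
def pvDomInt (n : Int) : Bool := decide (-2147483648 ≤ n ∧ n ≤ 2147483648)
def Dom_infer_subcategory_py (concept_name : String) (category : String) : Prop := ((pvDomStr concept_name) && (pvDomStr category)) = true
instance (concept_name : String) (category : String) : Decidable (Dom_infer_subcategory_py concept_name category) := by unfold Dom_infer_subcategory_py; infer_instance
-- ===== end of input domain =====

-- B replaces A's per-category nested if/elif chains of short-circuiting any() scans by one
-- full pass over a flat (category, keyword, rank, subcategory) priority table, keeping the
-- lowest-rank hit in an accumulator (objective: alternative; same asymptotic cost).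


-- ===== PORT A =====
def infer_subcategory_py (concept_name : String) (category : String) : String :=
  let name_lower := PySem.Str.lower concept_name
  if category = "Computer Science" then
    if ["sort", "merge", "quick", "heap", "bubble"].any (fun w => PySem.Str.isIn w name_lower) then
      "Sorting Algorithms"
    else if ["search", "bfs", "dfs", "dijkstra", "graph"].any (fun w => PySem.Str.isIn w name_lower) then
      "Graph Algorithms"
    else if ["tree", "binary", "avl", "red-black"].any (fun w => PySem.Str.isIn w name_lower) then
      "Data Structures"
    else if ["neural", "learning", "ai", "ml"].any (fun w => PySem.Str.isIn w name_lower) then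
      "Machine Learning"
    else "Algorithms"
  else if category = "Mathematics" then
    if ["derivative", "integral", "limit"].any (fun w => PySem.Str.isIn w name_lower) then
      "Calculus"
    else if ["matrix", "vector", "eigen"].any (fun w => PySem.Str.isIn w name_lower) then
      "Linear Algebra"
    else if ["graph", "combinatorics", "discrete"].any (fun w => PySem.Str.isIn w name_lower) then
      "Discrete Math"
    else "General Mathematics"
  else category

-- ===== PORT B =====
-- Source B's module-level _DEFAULTS dict
def pvDefaults : PySem.Dict String String :=
  PySem.Dict.ofList [("Computer Science", "Algorithms"), ("Mathematics", "General Mathematics")]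

-- Source B's flat priority table _KEYWORDS: (category, keyword, rank, subcategory)
def pvKeywords : List (String × String × Nat × String) :=
  [ ("Computer Science", "sort", 0, "Sorting Algorithms"),
    ("Computer Science", "merge", 0, "Sorting Algorithms"),
    ("Computer Science", "quick", 0, "Sorting Algorithms"),
    ("Computer Science", "heap", 0, "Sorting Algorithms"),
    ("Computer Science", "bubble", 0, "Sorting Algorithms"),
    ("Computer Science", "search", 1, "Graph Algorithms"),
    ("Computer Science", "bfs", 1, "Graph Algorithms"),
    ("Computer Science", "dfs", 1, "Graph Algorithms"),
    ("Computer Science", "dijkstra", 1, "Graph Algorithms"),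
    ("Computer Science", "graph", 1, "Graph Algorithms"),
    ("Computer Science", "tree", 2, "Data Structures"),
    ("Computer Science", "binary", 2, "Data Structures"),
    ("Computer Science", "avl", 2, "Data Structures"),
    ("Computer Science", "red-black", 2, "Data Structures"),
    ("Computer Science", "neural", 3, "Machine Learning"),
    ("Computer Science", "learning", 3, "Machine Learning"),
    ("Computer Science", "ai", 3, "Machine Learning"),
    ("Computer Science", "ml", 3, "Machine Learning"),
    ("Mathematics", "derivative", 4, "Calculus"),
    ("Mathematics", "integral", 4, "Calculus"),
    ("Mathematics", "limit", 4, "Calculus"),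
    ("Mathematics", "matrix", 5, "Linear Algebra"),
    ("Mathematics", "vector", 5, "Linear Algebra"),
    ("Mathematics", "eigen", 5, "Linear Algebra"),
    ("Mathematics", "graph", 6, "Discrete Math"),
    ("Mathematics", "combinatorics", 6, "Discrete Math"),
    ("Mathematics", "discrete", 6, "Discrete Math") ]

-- the body of Source B's for-loop: update best if this row is a lower-rank match
def pvStep (category name_lower : String)
    (best : Option (Nat × String)) (row : String × String × Nat × String) :
    Option (Nat × String) :=
  let (cat, kw, rank, sub) := row
  if cat == category && PySem.Str.isIn kw name_lower &&
      (match best with | none => true | some (r, _) => decide (rank < r)) then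
    some (rank, sub)
  else best

def infer_subcategory_py_alt (concept_name : String) (category : String) : String :=
  match pvDefaults.get? category with
  | none => category
  | some dflt =>
      let name_lower := PySem.Str.lower concept_name
      match pvKeywords.foldl (pvStep category name_lower) none with
      | some (_, sub) => sub
      | none => dflt

-- ===== PRECONDITION & SPEC =====
def Spec_infer_subcategory_py (concept_name : String) (category : String) (out : String) : Prop := out = infer_subcategory_py_alt concept_name category
instance (concept_name : String) (category : String) (out : String) : Decidable (Spec_infer_subcategory_py concept_name category out) := by unfold Spec_infer_subcategory_py; infer_instance

-- ===== CLAIM (what is proved, stated in full; the proofs are below) =====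
def Claim_equal_infer_subcategory_py : Prop := ∀ (concept_name : String) (category : String), Dom_infer_subcategory_py concept_name category → Spec_infer_subcategory_py concept_name category (infer_subcategory_py concept_name category)

-- ===== LEMMAS AND PROOFS =====

-- a contiguous group of the flat table: same category, rank and subcategory
def pvGroup (cat : String) (kws : List String) (g : Nat) (s : String) :
    List (String × String × Nat × String) :=
  kws.map (fun k => (cat, k, g, s))

-- rows of a foreign category never change the accumulator
theorem pvStep_skip (category nl : String) (cat : String) (h : (cat == category) = false)
    (kws : List String) (g : Nat) (s : String) (acc : Option (Nat × String)) :
    (pvGroup cat kws g s).foldl (pvStep category nl) acc = acc := by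
  induction kws generalizing acc with
  | nil => rfl
  | cons k ks ih => simp [pvGroup, List.foldl, pvStep, h] at ih ⊢; exact ih acc

-- once best has rank r and all remaining ranks are ≥ r, the fold is frozen
theorem pvStep_frozen (category nl : String) (r : Nat) (s : String)
    (rows : List (String × String × Nat × String)) (h : ∀ row ∈ rows, r ≤ row.2.2.1) :
    rows.foldl (pvStep category nl) (some (r, s)) = some (r, s) := by
  induction rows with
  | nil => rfl
  | cons row rest ih =>
      have hr : r ≤ row.2.2.1 := h row (by simp)
      have : pvStep category nl (some (r, s)) row = some (r, s) := by
        obtain ⟨cat, kw, rank, sub⟩ := row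
        simp only [pvStep]
        have : decide (rank < r) = false := by simp at hr ⊢; omega
        simp [this]
      rw [List.foldl_cons, this]
      exact ih (fun row hm => h row (by simp [hm]))

-- folding a matching-category group from none: first keyword hit locks in (g, s)
theorem pvStep_group (category nl : String) (kws : List String) (g : Nat) (s : String)
    (rest : List (String × String × Nat × String)) (hrest : ∀ row ∈ rest, g ≤ row.2.2.1) :
    (pvGroup category kws g s ++ rest).foldl (pvStep category nl) none =
      if kws.any (fun k => PySem.Str.isIn k nl) then some (g, s)
      else rest.foldl (pvStep category nl) none := by
  induction kws with
  | nil => simp [pvGroup]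
  | cons k ks ih =>
      have hcons : pvGroup category (k :: ks) g s ++ rest
          = (category, k, g, s) :: (pvGroup category ks g s ++ rest) := rfl
      rw [hcons, List.foldl_cons]
      cases hm : PySem.Str.isIn k nl with
      | true =>
          have hm2 : PySem.Chars.isIn k.toList nl.toList = true := by simpa using hm
          have hstep : pvStep category nl none (category, k, g, s) = some (g, s) := by
            simp [pvStep, hm2]
          have hfroz : (pvGroup category ks g s ++ rest).foldl (pvStep category nl)
              (some (g, s)) = some (g, s) := by
            apply pvStep_frozen
            intro row hr
            rcases List.mem_append.mp hr with hl | hrr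
            · obtain ⟨k', _, hk'⟩ := List.mem_map.mp hl
              simp [← hk']
            · exact hrest row hrr
          rw [hstep, hfroz, List.any_cons, hm, Bool.true_or, if_pos rfl]
      | false =>
          have hm2 : PySem.Chars.isIn k.toList nl.toList = false := by simpa using hm
          have hstep : pvStep category nl none (category, k, g, s) = none := by
            simp [pvStep, hm2]
          rw [hstep, ih, List.any_cons, hm, Bool.false_or]

-- the seven groups of the flat table
def pvG1 : List (String × String × Nat × String) := pvGroup "Computer Science" ["sort", "merge", "quick", "heap", "bubble"] 0 "Sorting Algorithms"
def pvG2 : List (String × String × Nat × String) := pvGroup "Computer Science" ["search", "bfs", "dfs", "dijkstra", "graph"] 1 "Graph Algorithms"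
def pvG3 : List (String × String × Nat × String) := pvGroup "Computer Science" ["tree", "binary", "avl", "red-black"] 2 "Data Structures"
def pvG4 : List (String × String × Nat × String) := pvGroup "Computer Science" ["neural", "learning", "ai", "ml"] 3 "Machine Learning"
def pvG5 : List (String × String × Nat × String) := pvGroup "Mathematics" ["derivative", "integral", "limit"] 4 "Calculus"
def pvG6 : List (String × String × Nat × String) := pvGroup "Mathematics" ["matrix", "vector", "eigen"] 5 "Linear Algebra"
def pvG7 : List (String × String × Nat × String) := pvGroup "Mathematics" ["graph", "combinatorics", "discrete"] 6 "Discrete Math"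

-- the concrete table is the concatenation of its seven groups
theorem pvKeywords_split :
    pvKeywords = pvG1 ++ (pvG2 ++ (pvG3 ++ (pvG4 ++ (pvG5 ++ (pvG6 ++ pvG7))))) := by rfl

theorem pvDefaults_get_none (cat : String) (h1 : cat ≠ "Computer Science")
    (h2 : cat ≠ "Mathematics") : pvDefaults.get? cat = none := by
  have b1 : ("Computer Science" == cat) = false := beq_eq_false_iff_ne.mpr (Ne.symm h1)
  have b2 : ("Mathematics" == cat) = false := beq_eq_false_iff_ne.mpr (Ne.symm h2)
  have hi : pvDefaults.items
      = [("Computer Science", "Algorithms"), ("Mathematics", "General Mathematics")] := by decide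
  simp [PySem.Dict.get?, hi, List.find?, b1, b2]

-- full evaluation of B's fold for category "Computer Science"
theorem pvFold_cs (nl : String) :
    pvKeywords.foldl (pvStep "Computer Science" nl) none =
      if ["sort", "merge", "quick", "heap", "bubble"].any (fun k => PySem.Str.isIn k nl) then some (0, "Sorting Algorithms")
      else if ["search", "bfs", "dfs", "dijkstra", "graph"].any (fun k => PySem.Str.isIn k nl) then some (1, "Graph Algorithms")
      else if ["tree", "binary", "avl", "red-black"].any (fun k => PySem.Str.isIn k nl) then some (2, "Data Structures")
      else if ["neural", "learning", "ai", "ml"].any (fun k => PySem.Str.isIn k nl) then some (3, "Machine Learning")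
      else none := by
  rw [pvKeywords_split]
  simp only [pvG1, pvG2, pvG3, pvG4, pvG5, pvG6, pvG7]
  rw [pvStep_group "Computer Science" nl ["sort", "merge", "quick", "heap", "bubble"] 0 "Sorting Algorithms" (pvGroup "Computer Science" ["search", "bfs", "dfs", "dijkstra", "graph"] 1 "Graph Algorithms" ++ (pvGroup "Computer Science" ["tree", "binary", "avl", "red-black"] 2 "Data Structures" ++ (pvGroup "Computer Science" ["neural", "learning", "ai", "ml"] 3 "Machine Learning" ++ (pvGroup "Mathematics" ["derivative", "integral", "limit"] 4 "Calculus" ++ (pvGroup "Mathematics" ["matrix", "vector", "eigen"] 5 "Linear Algebra" ++ pvGroup "Mathematics" ["graph", "combinatorics", "discrete"] 6 "Discrete Math"))))) (by decide)]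
  rw [pvStep_group "Computer Science" nl ["search", "bfs", "dfs", "dijkstra", "graph"] 1 "Graph Algorithms" (pvGroup "Computer Science" ["tree", "binary", "avl", "red-black"] 2 "Data Structures" ++ (pvGroup "Computer Science" ["neural", "learning", "ai", "ml"] 3 "Machine Learning" ++ (pvGroup "Mathematics" ["derivative", "integral", "limit"] 4 "Calculus" ++ (pvGroup "Mathematics" ["matrix", "vector", "eigen"] 5 "Linear Algebra" ++ pvGroup "Mathematics" ["graph", "combinatorics", "discrete"] 6 "Discrete Math")))) (by decide)]
  rw [pvStep_group "Computer Science" nl ["tree", "binary", "avl", "red-black"] 2 "Data Structures" (pvGroup "Computer Science" ["neural", "learning", "ai", "ml"] 3 "Machine Learning" ++ (pvGroup "Mathematics" ["derivative", "integral", "limit"] 4 "Calculus" ++ (pvGroup "Mathematics" ["matrix", "vector", "eigen"] 5 "Linear Algebra" ++ pvGroup "Mathematics" ["graph", "combinatorics", "discrete"] 6 "Discrete Math"))) (by decide)]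
  rw [pvStep_group "Computer Science" nl ["neural", "learning", "ai", "ml"] 3 "Machine Learning" (pvGroup "Mathematics" ["derivative", "integral", "limit"] 4 "Calculus" ++ (pvGroup "Mathematics" ["matrix", "vector", "eigen"] 5 "Linear Algebra" ++ pvGroup "Mathematics" ["graph", "combinatorics", "discrete"] 6 "Discrete Math")) (by decide)]
  rw [List.foldl_append, pvStep_skip "Computer Science" nl "Mathematics" (by decide) ["derivative", "integral", "limit"] 4 "Calculus"]
  rw [List.foldl_append, pvStep_skip "Computer Science" nl "Mathematics" (by decide) ["matrix", "vector", "eigen"] 5 "Linear Algebra"]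
  rw [pvStep_skip "Computer Science" nl "Mathematics" (by decide) ["graph", "combinatorics", "discrete"] 6 "Discrete Math"]

-- full evaluation of B's fold for category "Mathematics"
theorem pvFold_math (nl : String) :
    pvKeywords.foldl (pvStep "Mathematics" nl) none =
      if ["derivative", "integral", "limit"].any (fun k => PySem.Str.isIn k nl) then some (4, "Calculus")
      else if ["matrix", "vector", "eigen"].any (fun k => PySem.Str.isIn k nl) then some (5, "Linear Algebra")
      else if ["graph", "combinatorics", "discrete"].any (fun k => PySem.Str.isIn k nl) then some (6, "Discrete Math")
      else none := by
  rw [pvKeywords_split]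
  simp only [pvG1, pvG2, pvG3, pvG4, pvG5, pvG6, pvG7]
  rw [List.foldl_append, pvStep_skip "Mathematics" nl "Computer Science" (by decide) ["sort", "merge", "quick", "heap", "bubble"] 0 "Sorting Algorithms"]
  rw [List.foldl_append, pvStep_skip "Mathematics" nl "Computer Science" (by decide) ["search", "bfs", "dfs", "dijkstra", "graph"] 1 "Graph Algorithms"]
  rw [List.foldl_append, pvStep_skip "Mathematics" nl "Computer Science" (by decide) ["tree", "binary", "avl", "red-black"] 2 "Data Structures"]
  rw [List.foldl_append, pvStep_skip "Mathematics" nl "Computer Science" (by decide) ["neural", "learning", "ai", "ml"] 3 "Machine Learning"]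
  rw [pvStep_group "Mathematics" nl ["derivative", "integral", "limit"] 4 "Calculus" (pvGroup "Mathematics" ["matrix", "vector", "eigen"] 5 "Linear Algebra" ++ pvGroup "Mathematics" ["graph", "combinatorics", "discrete"] 6 "Discrete Math") (by decide)]
  rw [pvStep_group "Mathematics" nl ["matrix", "vector", "eigen"] 5 "Linear Algebra" (pvGroup "Mathematics" ["graph", "combinatorics", "discrete"] 6 "Discrete Math") (by decide)]
  rw [← List.append_nil (pvGroup "Mathematics" ["graph", "combinatorics", "discrete"] 6 "Discrete Math")]
  rw [pvStep_group "Mathematics" nl ["graph", "combinatorics", "discrete"] 6 "Discrete Math" ([] : List (String × String × Nat × String)) (by decide)]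
  rfl

theorem infer_eq (concept_name : String) (category : String) :
    infer_subcategory_py concept_name category = infer_subcategory_py_alt concept_name category := by
  by_cases h1 : category = "Computer Science"
  · subst h1
    have hd : pvDefaults.get? "Computer Science" = some "Algorithms" := by decide
    simp only [infer_subcategory_py, infer_subcategory_py_alt, hd, pvFold_cs, if_pos rfl]
    split_ifs <;> rfl
  · by_cases h2 : category = "Mathematics"
    · subst h2
      have hd : pvDefaults.get? "Mathematics" = some "General Mathematics" := by decide
      simp only [infer_subcategory_py, infer_subcategory_py_alt, hd, pvFold_math]
      norm_num
      split_ifs <;> rfl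
    · simp only [infer_subcategory_py, infer_subcategory_py_alt,
        pvDefaults_get_none category h1 h2, if_neg h1, if_neg h2]

-- ===== VERDICT (by name: the statement is the Claim_ definition above) =====
theorem infer_subcategory_py_spec : Claim_equal_infer_subcategory_py := by
  intro cn cat _
  unfold Spec_infer_subcategory_py
  exact infer_eq cn cat
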